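-- pv_equiv track=rewrite | github.com/SAG145/Project-Euler | PEP601 - Divisibility Streaks.py | prime_factors_with_repetitions
-- ===== SOURCE A (Python) =====
-- import math
--
-- def prime_factors_with_repetitions(n,primes_list):
--     if n % 2 == 0:
--         primes_list.append(2)
--         return prime_factors_with_repetitions(n // 2,primes_list)
--     else:
--         for k in range(3,int(math.sqrt(n)) + 1,2):
--             if n % k == 0:
--                 primes_list.append(k)
--                 return prime_factors_with_repetitions(n // k,primes_list)
--     return primes_list + [n]
-- ===== SOURCE B (Python) =====
-- def prime_factors_with_repetitions(n, primes_list):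
--     while n % 2 == 0:
--         primes_list.append(2)
--         n //= 2
--     d = 3
--     while d * d <= n:
--         if n % d == 0:
--             primes_list.append(d)
--             n //= d
--         else:
--             d += 2
--     return primes_list + [n]
-- ===== Notes on version B (the rewrite author's own statement) =====
-- stated objective: idiomatic
-- what changed: Replaces A's restart-from-scratch recursion (each level re-tests divisibility by 2 and rescans odd k from 3 up to a freshly computed int(sqrt(n))) with the textbook iterative trial division: strip all factors of 2 in one loop, then a single odd divisor d that only moves upward with the loop condition d*d <= n, dividing n in place.
import Mathlib
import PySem

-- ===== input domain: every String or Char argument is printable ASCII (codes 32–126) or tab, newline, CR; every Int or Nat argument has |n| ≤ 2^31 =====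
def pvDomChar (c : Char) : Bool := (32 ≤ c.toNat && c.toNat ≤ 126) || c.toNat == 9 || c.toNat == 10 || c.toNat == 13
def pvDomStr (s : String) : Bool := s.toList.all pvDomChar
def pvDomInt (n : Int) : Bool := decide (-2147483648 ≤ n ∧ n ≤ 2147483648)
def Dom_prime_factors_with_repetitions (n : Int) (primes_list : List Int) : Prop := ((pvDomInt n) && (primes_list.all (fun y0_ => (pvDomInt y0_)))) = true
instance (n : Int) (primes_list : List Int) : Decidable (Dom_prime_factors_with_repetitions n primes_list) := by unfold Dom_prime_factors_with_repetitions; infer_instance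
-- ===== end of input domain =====

-- B replaces A's restart-from-2 recursion by the textbook single increasing-divisor loop (idiomatic);
-- like A, B appends the intermediate factors to primes_list IN PLACE and only the final cofactor goes
-- solely into the returned fresh list (same side effect as A; the theorems are about the return value).

-- ===== PORT A =====
-- int(math.sqrt(n)): for 1 ≤ n ≤ 2^31 (all inputs Pre_ admits inside Dom_) the double sqrt is exact
-- enough that int(math.sqrt(n)) = ⌊√n⌋, ported as Nat.sqrt.
def pyIsqrt (n : Int) : Int := (Nat.sqrt n.toNat : Int)

-- the loop 'for k in range(3, int(math.sqrt(n)) + 1, 2): if n % k == 0: return …' scans k = 3, 5, …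
-- while k < stop and yields the first divisor found (the function returns there), else falls through
def scanA (n k stop : Int) : Option Int :=
  if k < stop then
    if PySem.Int.mod n k = 0 then some k else scanA n (k + 2) stop
  else none
termination_by (stop - k).toNat
decreasing_by omega

-- fuel makes the recursion total; for n ≥ 1 (Pre_) fuel n.toNat + 1 is never exhausted (n shrinks each call)
def pfAF : Nat → Int → List Int → List Int
  | 0, n, acc => acc ++ [n]
  | f + 1, n, acc =>
    if PySem.Int.mod n 2 = 0 then
      pfAF f (PySem.Int.floordiv n 2) (acc ++ [2])
    else
      match scanA n 3 (pyIsqrt n + 1) with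
      | some k => pfAF f (PySem.Int.floordiv n k) (acc ++ [k])
      | none => acc ++ [n]

def prime_factors_with_repetitions (n : Int) (primes_list : List Int) : List Int :=
  pfAF (n.toNat + 1) n primes_list

-- ===== PORT B =====
-- 'while n % 2 == 0: primes_list.append(2); n //= 2'  (fuel n.natAbs + 1 is ample whenever n ≠ 0)
def strip2F : Nat → Int → List Int → Int × List Int
  | 0, n, acc => (n, acc)
  | f + 1, n, acc =>
    if PySem.Int.mod n 2 = 0 then strip2F f (PySem.Int.floordiv n 2) (acc ++ [2])
    else (n, acc)

-- 'while d * d <= n: if n % d == 0: append d; n //= d  else: d += 2' then 'return primes_list + [n]'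
def oddF : Nat → Int → Int → List Int → List Int
  | 0, _, n, acc => acc ++ [n]
  | f + 1, d, n, acc =>
    if d * d ≤ n then
      if PySem.Int.mod n d = 0 then oddF f d (PySem.Int.floordiv n d) (acc ++ [d])
      else oddF f (d + 2) n acc
    else acc ++ [n]

def prime_factors_with_repetitions_alt (n : Int) (primes_list : List Int) : List Int :=
  let p := strip2F (n.natAbs + 1) n primes_list
  oddF (2 * n.toNat + 4) 3 p.1 p.2

-- ===== PRECONDITION & SPEC =====
-- Pre_ excludes exactly the inputs where the Python A raises: every n ≤ 0
-- (RecursionError for n = 0, math.sqrt ValueError for negative n).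
def Pre_prime_factors_with_repetitions (n : Int) (primes_list : List Int) : Prop := 1 ≤ n
instance (n : Int) (primes_list : List Int) : Decidable (Pre_prime_factors_with_repetitions n primes_list) := by unfold Pre_prime_factors_with_repetitions; infer_instance

def pvWitness_prime_factors_with_repetitions : Int × List Int := (12, [5])

def Spec_prime_factors_with_repetitions (n : Int) (primes_list : List Int) (out : List Int) : Prop := out = prime_factors_with_repetitions_alt n primes_list
instance (n : Int) (primes_list : List Int) (out : List Int) : Decidable (Spec_prime_factors_with_repetitions n primes_list out) := by unfold Spec_prime_factors_with_repetitions; infer_instance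

-- ===== CLAIM (what is proved, stated in full; the proofs are below) =====
def Claim_equal_prime_factors_with_repetitions : Prop := ∀ (n : Int) (primes_list : List Int), Dom_prime_factors_with_repetitions n primes_list → Pre_prime_factors_with_repetitions n primes_list → Spec_prime_factors_with_repetitions n primes_list (prime_factors_with_repetitions n primes_list)

-- ===== LEMMAS AND PROOFS =====

theorem scanA_eq_none (n k stop : Int)
    (h : ∀ i : Int, k ≤ i → i < stop → ¬ i ∣ n) : scanA n k stop = none := by
  fun_induction scanA n k stop with
  | case1 k hk hdvd =>
    exact absurd ((PySem.Int.mod_eq_zero_iff_dvd n k).mp hdvd) (h k le_rfl hk)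
  | case2 k hk hdvd ih => exact ih (fun i h1 h2 => h i (by omega) h2)
  | case3 k hk => rfl

theorem scanA_eq_some (n d stop : Int) (hds : d < stop) (hdvd : d ∣ n) (m : Nat) :
    ∀ k : Int, (d - k).toNat ≤ m → k ≤ d → (d - k) % 2 = 0 →
    (∀ i : Int, k ≤ i → i < d → (i - k) % 2 = 0 → ¬ i ∣ n) →
    scanA n k stop = some d := by
  induction m with
  | zero =>
    intro k hm hkd _ _
    have hk : k = d := by omega
    subst hk
    rw [scanA, if_pos hds, if_pos ((PySem.Int.mod_eq_zero_iff_dvd n k).mpr hdvd)]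
  | succ m ih =>
    intro k hm hkd hpar hinv
    rcases eq_or_lt_of_le hkd with rfl | hlt
    · rw [scanA, if_pos hds, if_pos ((PySem.Int.mod_eq_zero_iff_dvd n k).mpr hdvd)]
    · have hknd : ¬ k ∣ n := hinv k le_rfl hlt (by omega)
      rw [scanA, if_pos (by omega : k < stop),
        if_neg (fun h => hknd ((PySem.Int.mod_eq_zero_iff_dvd n k).mp h))]
      exact ih (k + 2) (by omega) (by omega) (by omega)
        (fun i h1 h2 h3 => hinv i (by omega) h2 (by omega))

theorem isq_le (n i : Int) (hn : 0 ≤ n) (hi : 0 ≤ i) : i ≤ pyIsqrt n ↔ i * i ≤ n := by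
  unfold pyIsqrt
  have h1 : (i.toNat : Int) = i := Int.toNat_of_nonneg hi
  have h2 : (n.toNat : Int) = n := Int.toNat_of_nonneg hn
  constructor
  · intro h
    have hle : i.toNat ≤ Nat.sqrt n.toNat := by omega
    have := Nat.le_sqrt.mp hle
    have : ((i.toNat * i.toNat : Nat) : Int) ≤ ((n.toNat : Nat) : Int) := by exact_mod_cast this
    push_cast at this
    rw [h1, h2] at this
    exact this
  · intro h
    have hNat : i.toNat * i.toNat ≤ n.toNat := by
      have : ((i.toNat * i.toNat : Nat) : Int) ≤ ((n.toNat : Nat) : Int) := by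
        push_cast; rw [h1, h2]; exact h
      exact_mod_cast this
    have := Nat.le_sqrt.mpr hNat
    omega

-- A returns acc ++ [n] once no candidate divisor is left
theorem A_returns (n d : Int) (acc : List Int) (fA : Nat)
    (hn : 1 ≤ n) (hodd : n % 2 = 1) (hd : 3 ≤ d)
    (hinv : ∀ i : Int, 3 ≤ i → i < d → i % 2 = 1 → ¬ i ∣ n)
    (hbig : ¬ d * d ≤ n) (hfA : 1 ≤ fA) :
    pfAF fA n acc = acc ++ [n] := by
  obtain ⟨f, rfl⟩ : ∃ f, fA = f + 1 := ⟨fA - 1, by omega⟩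
  have hm2 : PySem.Int.mod n 2 = 1 := by
    rw [PySem.Int.mod_eq_emod_of_pos (by norm_num)]; exact hodd
  simp only [pfAF, hm2]
  rw [if_neg (by omega : ¬ (1:Int) = 0)]
  rw [scanA_eq_none]
  intro i h3 hlt hdvd
  have hii : i * i ≤ n := (isq_le n i (by omega) (by omega)).mp (by omega)
  have hid : i < d := by nlinarith
  rcases Int.emod_two_eq i with hio | hio
  · have h2i : (2:Int) ∣ i := by omega
    have : (2:Int) ∣ n := dvd_trans h2i hdvd
    omega
  · exact hinv i h3 hid hio hdvd

-- core: once n is odd, A's recursion equals B's odd-divisor loop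
theorem core (fB : Nat) : ∀ (n d : Int) (acc : List Int) (fA : Nat),
    1 ≤ n → n % 2 = 1 → 3 ≤ d → d % 2 = 1 →
    (∀ i : Int, 3 ≤ i → i < d → i % 2 = 1 → ¬ i ∣ n) →
    n.toNat ≤ fA → 2 * n.toNat + 4 - d.toNat ≤ fB →
    pfAF fA n acc = oddF fB d n acc := by
  induction fB with
  | zero =>
    intro n d acc fA hn hodd hd hdo hinv hfA hfB
    have hnn : (n.toNat : Int) = n := Int.toNat_of_nonneg (by omega)
    have hdn : (d.toNat : Int) = d := Int.toNat_of_nonneg (by omega)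
    have hbig : ¬ d * d ≤ n := by
      intro hdd
      have h1 : 2 * n + 4 ≤ d := by omega
      nlinarith [mul_self_nonneg (d - 1)]
    simp only [oddF]
    exact A_returns n d acc fA hn hodd hd hinv hbig (by omega)
  | succ f ih =>
    intro n d acc fA hn hodd hd hdo hinv hfA hfB
    simp only [oddF]
    by_cases hdd : d * d ≤ n
    · rw [if_pos hdd]
      have hdpos : (0:Int) < d := by omega
      have hdlen : d ≤ n := by nlinarith
      by_cases hdvd : d ∣ n
      · rw [if_pos ((PySem.Int.mod_eq_zero_iff_dvd n d).mpr hdvd)]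
        obtain ⟨fA', rfl⟩ : ∃ f', fA = f' + 1 := ⟨fA - 1, by omega⟩
        have hm2 : PySem.Int.mod n 2 = 1 := by
          rw [PySem.Int.mod_eq_emod_of_pos (by norm_num)]; exact hodd
        simp only [pfAF, hm2]
        rw [if_neg (by omega : ¬ (1:Int) = 0)]
        rw [scanA_eq_some n d (pyIsqrt n + 1)
          (by have := (isq_le n d (by omega) (by omega)).mpr hdd; omega)
          hdvd (d - 3).toNat 3 le_rfl hd (by omega)
          (fun i h1 h2 h3 => hinv i h1 h2 (by omega))]
        change pfAF fA' (PySem.Int.floordiv n d) (acc ++ [d]) = _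
        rw [PySem.Int.floordiv_eq_ediv_of_pos hdpos]
        obtain ⟨c, rfl⟩ := hdvd
        have hc : d * c / d = c := Int.mul_ediv_cancel_left c (by omega)
        rw [hc]
        have hc1 : 1 ≤ c := by nlinarith
        have hcn : c < d * c := by nlinarith
        have hco : c % 2 = 1 := by
          rcases Int.emod_two_eq c with h | h
          · exfalso
        -- c even would make n even
            have : (2:Int) ∣ c := by omega
            have : (2:Int) ∣ d * c := Dvd.dvd.mul_left this d
            omega
          · exact h
        refine ih c d (acc ++ [d]) fA' hc1 hco hd hdo ?_ (by omega) (by omega)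
        intro i h1 h2 h3 hidvd
        exact hinv i h1 h2 h3 (hidvd.mul_left d)
      · rw [if_neg (fun h => hdvd ((PySem.Int.mod_eq_zero_iff_dvd n d).mp h))]
        refine ih n (d + 2) acc fA hn hodd (by omega) (by omega) ?_ hfA (by omega)
        intro i h1 h2 h3 hidvd
        rcases lt_or_ge i d with hlt | hge
        · exact hinv i h1 hlt h3 hidvd
        · have : i = d := by omega
          exact hdvd (this ▸ hidvd)
    · rw [if_neg hdd]
      exact A_returns n d acc fA hn hodd hd hinv hdd (by omega)

theorem main (m : Nat) : ∀ (n : Int) (acc : List Int) (fA fS fB : Nat),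
    1 ≤ n → n.toNat ≤ m → n.toNat ≤ fA → n.toNat ≤ fS → 2 * n.toNat + 1 ≤ fB →
    pfAF fA n acc = oddF fB 3 (strip2F fS n acc).1 (strip2F fS n acc).2 := by
  induction m with
  | zero => intro n acc fA fS fB hn hm _ _ _; omega
  | succ m ih =>
    intro n acc fA fS fB hn hm hfA hfS hfB
    by_cases he : n % 2 = 0
    · have hn2 : 2 ≤ n := by omega
      obtain ⟨fA', rfl⟩ : ∃ f', fA = f' + 1 := ⟨fA - 1, by omega⟩
      obtain ⟨fS', rfl⟩ : ∃ f', fS = f' + 1 := ⟨fS - 1, by omega⟩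
      have hm2 : PySem.Int.mod n 2 = 0 := by
        rw [PySem.Int.mod_eq_emod_of_pos (by norm_num)]; exact he
      simp only [pfAF, strip2F, hm2, if_pos]
      rw [PySem.Int.floordiv_eq_ediv_of_pos (by norm_num : (0:Int) < 2)]
      exact ih (n / 2) (acc ++ [2]) fA' fS' fB (by omega) (by omega) (by omega)
        (by omega) (by omega)
    · have hodd : n % 2 = 1 := by omega
      obtain ⟨fS', rfl⟩ : ∃ f', fS = f' + 1 := ⟨fS - 1, by omega⟩
      have hm2 : PySem.Int.mod n 2 = 1 := by
        rw [PySem.Int.mod_eq_emod_of_pos (by norm_num)]; exact hodd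
      simp only [strip2F, hm2]
      rw [if_neg (by omega : ¬ (1:Int) = 0)]
      exact core fB n 3 acc fA hn hodd le_rfl (by norm_num)
        (fun i h1 h2 _ => absurd h2 (by omega)) hfA (by omega)

-- ===== VERDICT (by name: the statement is the Claim_ definition above) =====
theorem prime_factors_with_repetitions_spec : Claim_equal_prime_factors_with_repetitions := by
  intro n acc _ hpre
  show _ = _
  unfold prime_factors_with_repetitions prime_factors_with_repetitions_alt
  have h1 : 1 ≤ n := hpre
  exact main n.toNat n acc (n.toNat + 1) (n.natAbs + 1) (2 * n.toNat + 4) h1 le_rfl (by omega) (by omega) (by omega)
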